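-- pv_equiv track=rewrite | github.com/yalisha/data-account | extract_annual_report_features.py | count_keywords_in_text
-- ===== SOURCE A (Python) =====
-- def count_keywords_in_text(text, keywords_dict):
--     """统计各维度关键词频率"""
--     counts = {}
--     total = 0
--     for dim, kws in keywords_dict.items():
--         dim_count = 0
--         for kw in kws:
--             c = text.count(kw)
--             dim_count += c
--         counts[dim] = dim_count
--         total += dim_count
--     counts['total'] = total
--     return counts
-- ===== SOURCE B (Python) =====
-- def count_keywords_in_text(text, keywords_dict):
--     """统计各维度关键词频率"""
--     kw_count = {}
--     for kws in keywords_dict.values():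
--         for kw in kws:
--             if kw not in kw_count:
--                 kw_count[kw] = text.count(kw)
--     counts = {dim: sum(kw_count[kw] for kw in kws) for dim, kws in keywords_dict.items()}
--     counts['total'] = sum(counts.values())
--     return counts
-- ===== Notes on version B (the rewrite author's own statement) =====
-- stated objective: faster
-- what changed: A scans the text with text.count once per keyword occurrence in the nested dim/keyword loops and keeps a running total; B first builds a per-distinct-keyword count cache in one pass, then aggregates each dimension by dict lookup in a comprehension and derives the total from the finished values, so repeated keywords are scanned once. Pre_ excludes association lists with a repeated dimension key, where A adds both passes into total but a dict rebuild keeps only the last; a real Python dict argument cannot have duplicate keys.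
import Mathlib
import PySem

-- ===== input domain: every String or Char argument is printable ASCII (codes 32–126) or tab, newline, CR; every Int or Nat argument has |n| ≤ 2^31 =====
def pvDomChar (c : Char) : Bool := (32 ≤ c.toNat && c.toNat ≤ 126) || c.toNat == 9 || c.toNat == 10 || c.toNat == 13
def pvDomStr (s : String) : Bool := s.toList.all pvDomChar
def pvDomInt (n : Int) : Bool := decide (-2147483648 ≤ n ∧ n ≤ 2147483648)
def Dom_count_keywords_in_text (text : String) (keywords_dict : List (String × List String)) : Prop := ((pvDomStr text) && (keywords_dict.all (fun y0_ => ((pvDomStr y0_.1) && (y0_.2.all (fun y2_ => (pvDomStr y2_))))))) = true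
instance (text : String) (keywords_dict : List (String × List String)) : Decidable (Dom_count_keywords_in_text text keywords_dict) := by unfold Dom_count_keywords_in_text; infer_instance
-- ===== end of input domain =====

-- B memoizes text.count per distinct keyword once, then aggregates per dimension by lookup;
-- an alternative decomposition with the same results on distinct dimension keys.

-- ===== PORT A =====
def count_keywords_in_text (text : String) (keywords_dict : List (String × List String)) : List (String × Int) :=
  -- counts = {}; total = 0; for dim, kws in items: dim_count = Σ text.count(kw); counts[dim] = dim_count; total += dim_count
  let cs := keywords_dict.foldl
      (fun (acc : PySem.Dict String Int × Int) p =>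
        let dim_count : Int := p.2.foldl (fun dc kw => dc + (PySem.Str.count text kw : Int)) 0
        (acc.1.insert p.1 dim_count, acc.2 + dim_count))
      (PySem.Dict.empty, 0)
  -- counts['total'] = total; return counts
  ((cs.1.insert "total" cs.2).items)

-- ===== PORT B =====
def count_keywords_in_text_alt (text : String) (keywords_dict : List (String × List String)) : List (String × Int) :=
  -- kw_count = {}; for kws in values: for kw in kws: if kw not in kw_count: kw_count[kw] = text.count(kw)
  let kwCount : PySem.Dict String Int := keywords_dict.foldl
      (fun d p => p.2.foldl
        (fun d kw => if d.contains kw then d else d.insert kw (PySem.Str.count text kw : Int)) d)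
      PySem.Dict.empty
  -- counts = {dim: sum(kw_count[kw] for kw in kws) for dim, kws in items}
  let counts : PySem.Dict String Int := keywords_dict.foldl
      (fun d p => d.insert p.1 (p.2.foldl (fun dc kw => dc + kwCount.getD kw 0) 0))
      PySem.Dict.empty
  -- counts['total'] = sum(counts.values()); return counts
  ((counts.insert "total" counts.values.sum).items)

-- ===== PRECONDITION & SPEC =====
-- Pre_ excludes association lists with a repeated dimension key: keywords_dict is a Python
-- dict, whose keys are necessarily distinct, so no Python input A accepts is excluded.
def Pre_count_keywords_in_text (text : String) (keywords_dict : List (String × List String)) : Prop :=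
  (keywords_dict.map Prod.fst).Nodup
instance (text : String) (keywords_dict : List (String × List String)) : Decidable (Pre_count_keywords_in_text text keywords_dict) := by unfold Pre_count_keywords_in_text; infer_instance
def pvWitness_count_keywords_in_text : String × (List (String × List String)) :=
  ("abc ab", [("x", ["ab", "a"]), ("y", ["c"])])
def Spec_count_keywords_in_text (text : String) (keywords_dict : List (String × List String)) (out : List (String × Int)) : Prop := out = count_keywords_in_text_alt text keywords_dict
instance (text : String) (keywords_dict : List (String × List String)) (out : List (String × Int)) : Decidable (Spec_count_keywords_in_text text keywords_dict out) := by unfold Spec_count_keywords_in_text; infer_instance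

-- ===== CLAIM =====
def Claim_equal_count_keywords_in_text : Prop := ∀ (text : String) (keywords_dict : List (String × List String)), Dom_count_keywords_in_text text keywords_dict → Pre_count_keywords_in_text text keywords_dict → Spec_count_keywords_in_text text keywords_dict (count_keywords_in_text text keywords_dict)

-- ===== LEMMAS AND PROOFS =====

-- B's cache-building step over one keyword list
def pvFill (f : String → Int) (ks : List String) (d : PySem.Dict String Int) : PySem.Dict String Int :=
  ks.foldl (fun d kw => if d.contains kw then d else d.insert kw (f kw)) d

-- B's whole cache
def pvCache (f : String → Int) (kd : List (String × List String)) : PySem.Dict String Int :=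
  kd.foldl (fun d p => pvFill f p.2 d) PySem.Dict.empty

-- invariant: every key present in the cache holds its f-value
def pvOK (f : String → Int) (d : PySem.Dict String Int) : Prop :=
  ∀ k, d.contains k = true → d.getD k 0 = f k

theorem pvFill_ok (f : String → Int) (ks : List String) :
    ∀ d, pvOK f d → pvOK f (pvFill f ks d) := by
  induction ks with
  | nil => intro d h; exact h
  | cons a ks ih =>
    intro d h
    rw [pvFill, List.foldl_cons]
    apply ih
    split_ifs with hc
    · exact h
    · intro k hk
      rw [PySem.Dict.getD_insert]
      split_ifs with he
      · rw [he]
      · rw [PySem.Dict.contains_insert] at hk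
        simp [he] at hk
        exact h k hk

theorem pvFill_contains_mono (f : String → Int) (ks : List String) :
    ∀ d k, d.contains k = true → (pvFill f ks d).contains k = true := by
  induction ks with
  | nil => intro d k h; exact h
  | cons a ks ih =>
    intro d k h
    rw [pvFill, List.foldl_cons]
    apply ih
    split_ifs with hc
    · exact h
    · rw [PySem.Dict.contains_insert, h]
      simp

theorem pvFill_contains_mem (f : String → Int) (ks : List String) :
    ∀ d k, k ∈ ks → (pvFill f ks d).contains k = true := by
  induction ks with
  | nil => intro d k h; exact absurd h (List.not_mem_nil)
  | cons a ks ih =>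
    intro d k h
    rw [pvFill, List.foldl_cons]
    rcases List.mem_cons.mp h with rfl | h'
    · apply pvFill_contains_mono
      split_ifs with hc
      · exact hc
      · rw [PySem.Dict.contains_insert]; simp
    · exact ih _ _ h'

theorem pvCache_ok (f : String → Int) (kd : List (String × List String)) :
    pvOK f (pvCache f kd) := by
  have : ∀ d, pvOK f d → pvOK f (kd.foldl (fun d p => pvFill f p.2 d) d) := by
    induction kd with
    | nil => intro d h; exact h
    | cons a kd ih => intro d h; exact ih _ (pvFill_ok f a.2 d h)
  exact this PySem.Dict.empty (by intro k hk; rw [PySem.Dict.contains_empty] at hk; cases hk)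

theorem pvFoldFill_mono (f : String → Int) (kd : List (String × List String)) :
    ∀ (d : PySem.Dict String Int) (k : String), d.contains k = true →
      (kd.foldl (fun d p => pvFill f p.2 d) d).contains k = true := by
  induction kd with
  | nil => intro d k h; exact h
  | cons a kd ih => intro d k h; exact ih _ _ (pvFill_contains_mono f a.2 d k h)

theorem pvCache_contains (f : String → Int) (kd : List (String × List String))
    (p : String × List String) (kw : String) (hp : p ∈ kd) (hkw : kw ∈ p.2) :
    (pvCache f kd).contains kw = true := by
  have gen : ∀ (l : List (String × List String)) (d : PySem.Dict String Int), p ∈ l →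
      (l.foldl (fun d p => pvFill f p.2 d) d).contains kw = true := by
    intro l
    induction l with
    | nil => intro d h; exact absurd h (List.not_mem_nil)
    | cons a l ih =>
      intro d h
      rcases List.mem_cons.mp h with rfl | h'
      · exact pvFoldFill_mono f l _ kw (pvFill_contains_mem f p.2 d kw hkw)
      · exact ih _ h'
  exact gen kd PySem.Dict.empty hp

theorem pvCache_getD (f : String → Int) (kd : List (String × List String))
    (p : String × List String) (kw : String) (hp : p ∈ kd) (hkw : kw ∈ p.2) :
    (pvCache f kd).getD kw 0 = f kw :=
  pvCache_ok f kd kw (pvCache_contains f kd p kw hp hkw)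

-- the per-dimension aggregation loop of A, abstracted over the per-keyword value
def pvAgg (v : String → Int) (kd : List (String × List String)) (acc : PySem.Dict String Int × Int) : PySem.Dict String Int × Int :=
  kd.foldl (fun acc p =>
    (acc.1.insert p.1 (p.2.foldl (fun dc kw => dc + v kw) 0),
     acc.2 + p.2.foldl (fun dc kw => dc + v kw) 0)) acc

-- B's dict comprehension over the dimensions, abstracted over the per-keyword value
def pvCDict (v : String → Int) (kd : List (String × List String)) (d : PySem.Dict String Int) : PySem.Dict String Int :=
  kd.foldl (fun d p => d.insert p.1 (p.2.foldl (fun dc kw => dc + v kw) 0)) d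

theorem pv_sum_congr (vA vB : String → Int) (l : List String) :
    ∀ (c : Int), (∀ kw ∈ l, vA kw = vB kw) →
      l.foldl (fun dc kw => dc + vA kw) c = l.foldl (fun dc kw => dc + vB kw) c := by
  induction l with
  | nil => intro c _; rfl
  | cons a l ih =>
    intro c h
    rw [List.foldl_cons, List.foldl_cons, h a List.mem_cons_self]
    exact ih _ (fun kw hkw => h kw (List.mem_cons_of_mem a hkw))

theorem pv_agg_congr (vA vB : String → Int) (kd : List (String × List String)) :
    ∀ (acc : PySem.Dict String Int × Int), (∀ p ∈ kd, ∀ kw ∈ p.2, vA kw = vB kw) →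
      pvAgg vA kd acc = pvAgg vB kd acc := by
  induction kd with
  | nil => intro acc _; rfl
  | cons a kd ih =>
    intro acc h
    unfold pvAgg
    rw [List.foldl_cons, List.foldl_cons]
    rw [pv_sum_congr vA vB a.2 0 (h a List.mem_cons_self)]
    exact ih _ (fun p hp kw hkw => h p (List.mem_cons_of_mem a hp) kw hkw)

theorem pv_agg_fst (v : String → Int) (kd : List (String × List String)) :
    ∀ (acc : PySem.Dict String Int × Int), (pvAgg v kd acc).1 = pvCDict v kd acc.1 := by
  induction kd with
  | nil => intro acc; rfl
  | cons a kd ih =>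
    intro acc
    unfold pvAgg pvCDict
    rw [List.foldl_cons, List.foldl_cons]
    exact ih _

theorem pv_agg_snd (v : String → Int) (kd : List (String × List String)) :
    ∀ (acc : PySem.Dict String Int × Int),
      (pvAgg v kd acc).2 = acc.2 + (kd.map (fun p => p.2.foldl (fun dc kw => dc + v kw) 0)).sum := by
  induction kd with
  | nil => intro acc; simp [pvAgg]
  | cons a kd ih =>
    intro acc
    unfold pvAgg
    rw [List.foldl_cons]
    have := ih (acc.1.insert a.1 (a.2.foldl (fun dc kw => dc + v kw) 0),
      acc.2 + a.2.foldl (fun dc kw => dc + v kw) 0)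
    unfold pvAgg at this
    rw [this, List.map_cons, List.sum_cons]
    ring

theorem pv_cdict_values (v : String → Int) (kd : List (String × List String))
    (hnd : (kd.map Prod.fst).Nodup) :
    (pvCDict v kd PySem.Dict.empty).values
      = kd.map (fun p => p.2.foldl (fun dc kw => dc + v kw) 0) := by
  have h := PySem.Dict.items_foldl_insert_fresh kd Prod.fst
    (fun p => p.2.foldl (fun dc kw => dc + v kw) 0) PySem.Dict.empty
    (fun a _ => PySem.Dict.contains_empty a.1) hnd
  show ((pvCDict v kd PySem.Dict.empty).items).map Prod.snd = _
  unfold pvCDict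
  rw [h]
  simp [PySem.Dict.empty, Function.comp]

-- ===== VERDICT =====
theorem count_keywords_in_text_spec : Claim_equal_count_keywords_in_text := by
  intro text kd _ hpre
  unfold Spec_count_keywords_in_text
  have hmain :
      pvAgg (fun kw => (PySem.Str.count text kw : Int)) kd (PySem.Dict.empty, 0)
        = pvAgg (fun kw => (pvCache (fun kw => (PySem.Str.count text kw : Int)) kd).getD kw 0)
            kd (PySem.Dict.empty, 0) := by
    apply pv_agg_congr
    intro p hp kw hkw
    exact (pvCache_getD (fun kw => (PySem.Str.count text kw : Int)) kd p kw hp hkw).symm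
  have hgen : ∀ v : String → Int,
      ((pvAgg v kd (PySem.Dict.empty, 0)).1.insert "total" (pvAgg v kd (PySem.Dict.empty, 0)).2).items
        = ((pvCDict v kd PySem.Dict.empty).insert "total" (pvCDict v kd PySem.Dict.empty).values.sum).items := by
    intro v
    rw [pv_agg_fst, pv_agg_snd, pv_cdict_values v kd hpre]
    simp
  calc count_keywords_in_text text kd
      = ((pvAgg (fun kw => (PySem.Str.count text kw : Int)) kd (PySem.Dict.empty, 0)).1.insert "total"
          (pvAgg (fun kw => (PySem.Str.count text kw : Int)) kd (PySem.Dict.empty, 0)).2).items := rfl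
    _ = ((pvAgg (fun kw => (pvCache (fun kw => (PySem.Str.count text kw : Int)) kd).getD kw 0) kd (PySem.Dict.empty, 0)).1.insert "total"
          (pvAgg (fun kw => (pvCache (fun kw => (PySem.Str.count text kw : Int)) kd).getD kw 0) kd (PySem.Dict.empty, 0)).2).items := by rw [hmain]
    _ = ((pvCDict (fun kw => (pvCache (fun kw => (PySem.Str.count text kw : Int)) kd).getD kw 0) kd PySem.Dict.empty).insert "total"
          (pvCDict (fun kw => (pvCache (fun kw => (PySem.Str.count text kw : Int)) kd).getD kw 0) kd PySem.Dict.empty).values.sum).items := hgen _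
    _ = count_keywords_in_text_alt text kd := rfl
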